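-- pv_equiv track=rewrite | github.com/ekline-io/ekline-docs-skills | skills/llms-txt/scripts/generate_llms_txt.py | prioritize_pages
-- ===== SOURCE A (Python) =====
-- def prioritize_pages(pages):
--     priority_keywords = ["getting-started", "quickstart", "installation", "overview", "introduction", "index", "readme"]
--
--     def sort_key(page):
--         lower = page["rel_path"].lower()
--         for i, kw in enumerate(priority_keywords):
--             if kw in lower:
--                 return (0, i, lower)
--         return (1, 0, lower)
--
--     return sorted(pages, key=sort_key)
-- ===== SOURCE B (Python) =====
-- def prioritize_pages(pages):
--     priority_keywords = ["getting-started", "quickstart", "installation", "overview", "introduction", "index", "readme"]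
--
--     def rank(page):
--         lower = page["rel_path"].lower()
--         for i, kw in enumerate(priority_keywords):
--             if kw in lower:
--                 return i
--         return len(priority_keywords)
--
--     result = []
--     for r in range(len(priority_keywords) + 1):
--         bucket = [p for p in pages if rank(p) == r]
--         bucket.sort(key=lambda p: p["rel_path"].lower())
--         result += bucket
--     return result
-- ===== Notes on version B (the rewrite author's own statement) =====
-- stated objective: alternative
-- what changed: Replaces the single sort with a composite (priority, index, lowered-path) key by a partition of the pages into 8 rank buckets (first matching keyword, or none), each bucket stable-sorted by the lowercased rel_path alone, concatenated in bucket order.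
-- outside the precondition, e.g. on prioritize_pages([{'title': 'x'}]): A raises KeyError, B raises KeyError
import Mathlib
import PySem

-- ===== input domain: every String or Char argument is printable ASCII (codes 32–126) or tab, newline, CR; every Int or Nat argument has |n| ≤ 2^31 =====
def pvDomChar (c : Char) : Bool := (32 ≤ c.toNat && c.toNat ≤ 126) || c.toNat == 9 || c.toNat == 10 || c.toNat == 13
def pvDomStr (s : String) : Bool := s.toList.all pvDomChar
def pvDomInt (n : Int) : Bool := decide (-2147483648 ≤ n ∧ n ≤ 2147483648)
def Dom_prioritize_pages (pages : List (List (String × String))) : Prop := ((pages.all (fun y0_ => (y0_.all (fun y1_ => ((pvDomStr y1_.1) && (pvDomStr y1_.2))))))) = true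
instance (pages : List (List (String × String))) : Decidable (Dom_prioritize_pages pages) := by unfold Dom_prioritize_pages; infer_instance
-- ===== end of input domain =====

-- B replaces the single composite-key sort by a partition into priority buckets, each
-- stable-sorted by the lowercased path alone, concatenated in bucket order (alternative
-- decomposition; no speed claim).

-- shared constant: the priority keyword list both Pythons write out
def pvPriorityKeywords : List String :=
  ["getting-started", "quickstart", "installation", "overview", "introduction", "index", "readme"]

-- page["rel_path"].lower(); Python raises KeyError when the key is absent — Pre_ excludes
-- that, so the .getD "" default is never reached on admitted inputs
def pvRelLower (page : List (String × String)) : String :=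
  PySem.Str.lower ((PySem.Dict.get? (PySem.Dict.mk page) "rel_path").getD "")

-- ===== PORT A =====
-- the 'for i, kw in enumerate(priority_keywords): if kw in lower: return (0, i, lower)'
-- loop of sort_key; the Python 3-tuple key (a, b, c) is carried as (a, toLex (b, c)) —
-- Python's lexicographic tuple `<` is exactly the 2-level comparison PySem.List.sorted2
-- performs on the first component and the lexicographic pair
def pvSortKeyAux : List String → Int → String → Int × Lex (Int × String)
  | [], _, lower => (1, toLex (0, lower))
  | kw :: rest, i, lower =>
      if PySem.Str.isIn kw lower then (0, toLex (i, lower))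
      else pvSortKeyAux rest (i + 1) lower

def pvSortKey (page : List (String × String)) : Int × Lex (Int × String) :=
  pvSortKeyAux pvPriorityKeywords 0 (pvRelLower page)

def prioritize_pages (pages : List (List (String × String))) : List (List (String × String)) :=
  PySem.List.sorted2 pages (fun p => (pvSortKey p).1) (fun p => (pvSortKey p).2)

-- ===== PORT B =====
-- rank(page): index of the first matching keyword, len(priority_keywords) if none
def pvRankAux : List String → Nat → String → Nat
  | [], n, _ => n
  | kw :: rest, n, lower => if PySem.Str.isIn kw lower then n else pvRankAux rest (n + 1) lower

def pvRank (page : List (String × String)) : Nat :=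
  pvRankAux pvPriorityKeywords 0 (pvRelLower page)

def prioritize_pages_alt (pages : List (List (String × String))) : List (List (String × String)) :=
  (PySem.List.pyRange 0 ((pvPriorityKeywords.length : Int) + 1) 1).foldl
    (fun result r =>
      result ++ PySem.List.sorted (pages.filter (fun p => ((pvRank p : Int) == r))) pvRelLower) []

-- ===== PRECONDITION & SPEC =====
-- Pre_ excludes only pages without a "rel_path" key, on which Python A raises KeyError
def Pre_prioritize_pages (pages : List (List (String × String))) : Prop :=
  ∀ p ∈ pages, (PySem.Dict.get? (PySem.Dict.mk p) "rel_path").isSome = true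
instance (pages : List (List (String × String))) : Decidable (Pre_prioritize_pages pages) := by
  unfold Pre_prioritize_pages; infer_instance

def pvWitness_prioritize_pages : (List (List (String × String))) :=
  [[("rel_path", "docs/Index.md")], [("rel_path", "a.md"), ("title", "A")]]

def Spec_prioritize_pages (pages : List (List (String × String))) (out : List (List (String × String))) : Prop := out = prioritize_pages_alt pages
instance (pages : List (List (String × String))) (out : List (List (String × String))) : Decidable (Spec_prioritize_pages pages out) := by unfold Spec_prioritize_pages; infer_instance

-- ===== CLAIM (what is proved, stated in full; the proofs are below) =====
def Claim_equal_prioritize_pages : Prop := ∀ (pages : List (List (String × String))), Dom_prioritize_pages pages → Pre_prioritize_pages pages → Spec_prioritize_pages pages (prioritize_pages pages)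

-- ===== LEMMAS AND PROOFS =====

-- one bucket of B: the pages of rank r, stable-sorted by lowercased path
def pvBucket (pages : List (List (String × String))) (r : Int) : List (List (String × String)) :=
  PySem.List.sorted (pages.filter (fun p => ((pvRank p : Int) == r))) pvRelLower

lemma pvRankAux_add (kws : List String) (lower : String) :
    ∀ n, pvRankAux kws n lower = n + pvRankAux kws 0 lower := by
  induction kws with
  | nil => intro n; simp [pvRankAux]
  | cons kw rest ih =>
      intro n
      by_cases h : PySem.Chars.isIn kw.toList lower.toList = true
      · simp [pvRankAux, h]
      · simp only [pvRankAux]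
        rw [if_neg (by simpa using h), if_neg (by simpa using h), ih (n + 1), ih 1]
        omega

lemma pvRankAux_le (kws : List String) (lower : String) :
    pvRankAux kws 0 lower ≤ kws.length := by
  induction kws with
  | nil => simp [pvRankAux]
  | cons kw rest ih =>
      by_cases h : PySem.Chars.isIn kw.toList lower.toList = true
      · simp [pvRankAux, h]
      · simp only [pvRankAux, List.length_cons]
        rw [if_neg (by simpa using h), pvRankAux_add rest lower 1]
        omega

lemma pvSortKeyAux_eq (kws : List String) (lower : String) :
    ∀ i : Int, pvSortKeyAux kws i lower =
      if pvRankAux kws 0 lower < kws.length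
      then (0, toLex (i + (pvRankAux kws 0 lower : Int), lower))
      else (1, toLex (0, lower)) := by
  induction kws with
  | nil => intro i; simp [pvSortKeyAux, pvRankAux]
  | cons kw rest ih =>
      intro i
      by_cases h : PySem.Chars.isIn kw.toList lower.toList = true
      · simp [pvSortKeyAux, pvRankAux, h]
      · have hr : pvRankAux (kw :: rest) 0 lower = 1 + pvRankAux rest 0 lower := by
          simp only [pvRankAux]
          rw [if_neg (by simpa using h), pvRankAux_add rest lower 1]
        simp only [pvSortKeyAux, List.length_cons, hr]
        rw [if_neg (by simpa using h), ih (i + 1)]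
        by_cases h2 : pvRankAux rest 0 lower < rest.length
        · rw [if_pos h2, if_pos (by omega)]
          congr 2
          push_cast; ring_nf
        · rw [if_neg h2, if_neg (by omega)]

lemma pvLen_keywords : pvPriorityKeywords.length = 7 := by decide

-- the comparator PySem.List.sorted2 uses for port A's two-part key
def pvBeforeA (a b : List (String × String)) : Bool :=
  decide ((pvSortKey a).1 < (pvSortKey b).1) ||
    (!decide ((pvSortKey b).1 < (pvSortKey a).1) && decide ((pvSortKey a).2 < (pvSortKey b).2))

lemma pvKey_eq (p : List (String × String)) :
    pvSortKey p = (if pvRank p < 7 then ((0:Int), toLex ((pvRank p : Int), pvRelLower p))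
      else ((1:Int), toLex ((0:Int), pvRelLower p))) := by
  unfold pvSortKey pvRank
  rw [pvSortKeyAux_eq _ _ 0, pvLen_keywords]
  split_ifs with h
  · rw [zero_add]
  · rfl

lemma pvBeforeA_iff (x y : List (String × String)) :
    pvBeforeA x y = true ↔
      (pvRank x < pvRank y ∨ (pvRank x = pvRank y ∧ pvRelLower x < pvRelLower y)) := by
  have hx : pvRank x ≤ 7 := by
    have := pvRankAux_le pvPriorityKeywords (pvRelLower x); unfold pvRank
    rwa [pvLen_keywords] at this
  have hy : pvRank y ≤ 7 := by
    have := pvRankAux_le pvPriorityKeywords (pvRelLower y); unfold pvRank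
    rwa [pvLen_keywords] at this
  unfold pvBeforeA
  rw [pvKey_eq x, pvKey_eq y]
  generalize pvRelLower x = lx
  generalize pvRelLower y = ly
  generalize hgx : pvRank x = rx at hx ⊢
  generalize hgy : pvRank y = ry at hy ⊢
  by_cases h1 : rx < 7 <;> by_cases h2 : ry < 7 <;>
    simp only [h1, h2, if_true, if_false, Bool.or_eq_true, Bool.and_eq_true,
      Bool.not_eq_true', decide_eq_true_eq, decide_eq_false_iff_not,
      Prod.Lex.toLex_lt_toLex, lt_self_iff_false, false_or, not_false_iff, true_and]
  · constructor
    · rintro (h | ⟨h, hs⟩)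
      · exact Or.inl (by exact_mod_cast h)
      · exact Or.inr ⟨by exact_mod_cast h, hs⟩
    · rintro (h | ⟨h, hs⟩)
      · exact Or.inl (by exact_mod_cast h)
      · exact Or.inr ⟨by exact_mod_cast h, hs⟩
  · constructor
    · intro; exact Or.inl (by omega)
    · intro; exact Or.inl (by omega)
  · constructor
    · rintro (h | ⟨hn, -⟩)
      · omega
      · exact absurd (by omega : (0:Int) < 1) hn
    · rintro (h | ⟨h, -⟩) <;> [omega; omega]
  · constructor
    · intro hs; exact Or.inr ⟨by omega, hs⟩
    · rintro (h | ⟨-, hs⟩)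
      · exact absurd h (by omega)
      · exact hs

lemma pvBeforeA_eq_false (x y : List (String × String))
    (h : ¬ (pvRank x < pvRank y ∨ (pvRank x = pvRank y ∧ pvRelLower x < pvRelLower y))) :
    pvBeforeA x y = false := by
  cases hb : pvBeforeA x y
  · rfl
  · exact absurd ((pvBeforeA_iff x y).mp hb) h

lemma pvSortedA_snoc (ps : List (List (String × String))) (x : List (String × String)) :
    prioritize_pages (ps ++ [x]) = PySem.List.insertBy pvBeforeA x (prioritize_pages ps) := by
  unfold prioritize_pages
  show List.foldl _ [] (ps ++ [x]) = _
  rw [List.foldl_append]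
  rfl

lemma pvInsertBy_append_left {α : Type} (before : α → α → Bool) (x : α) (zs ys : List α)
    (h : ∀ y ∈ zs, before x y = false) :
    PySem.List.insertBy before x (zs ++ ys) = zs ++ PySem.List.insertBy before x ys := by
  induction zs with
  | nil => simp
  | cons z zs ih =>
      simp only [List.cons_append, PySem.List.insertBy]
      rw [h z (by simp), ih (fun y hy => h y (by simp [hy]))]
      simp

lemma pvInsertBy_append_right {α : Type} (before : α → α → Bool) (x : α) (zs ys : List α)
    (h : ∀ y ∈ ys, before x y = true) :
    PySem.List.insertBy before x (zs ++ ys) = PySem.List.insertBy before x zs ++ ys := by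
  induction zs with
  | nil =>
      cases ys with
      | nil => simp [PySem.List.insertBy]
      | cons y t =>
          simp only [List.nil_append, PySem.List.insertBy]
          rw [h y (by simp)]
          simp
  | cons z zs ih =>
      simp only [List.cons_append, PySem.List.insertBy]
      by_cases hz : before x z = true
      · simp [hz]
      · rw [Bool.not_eq_true] at hz
        simp [hz, ih]

lemma pvInsertBy_congr {α : Type} (b1 b2 : α → α → Bool) (x : α) (ys : List α)
    (h : ∀ y ∈ ys, b1 x y = b2 x y) :
    PySem.List.insertBy b1 x ys = PySem.List.insertBy b2 x ys := by
  induction ys with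
  | nil => rfl
  | cons y t ih =>
      simp only [PySem.List.insertBy]
      rw [h y (by simp), ih (fun z hz => h z (by simp [hz]))]

lemma pvSorted_snoc {α κ : Type} [LT κ] [DecidableLT κ] (ps : List α) (x : α) (key : α → κ) :
    PySem.List.sorted (ps ++ [x]) key = PySem.List.insertBy (fun a b => decide (key a < key b)) x (PySem.List.sorted ps key) := by
  rw [PySem.List.sorted_eq_foldl_insertBy, PySem.List.sorted_eq_foldl_insertBy, List.foldl_append]
  rfl

lemma pvBucket_rank {pages : List (List (String × String))} {r : Int}
    {y : List (String × String)} (h : y ∈ pvBucket pages r) : (pvRank y : Int) = r := by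
  unfold pvBucket at h
  rw [PySem.List.mem_sorted] at h
  rw [List.mem_filter] at h
  simpa using h.2

lemma pvBucket_snoc (pages : List (List (String × String))) (x : List (String × String)) (r : Int) :
    pvBucket (pages ++ [x]) r =
      if (pvRank x : Int) = r
      then PySem.List.insertBy (fun a b => decide (pvRelLower a < pvRelLower b)) x (pvBucket pages r)
      else pvBucket pages r := by
  unfold pvBucket
  rw [List.filter_append]
  by_cases hx : (pvRank x : Int) = r
  · rw [if_pos hx, show List.filter (fun p => ((pvRank p : Int) == r)) [x] = [x] from by simp [hx]]
    exact pvSorted_snoc _ x pvRelLower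
  · rw [if_neg hx, show List.filter (fun p => ((pvRank p : Int) == r)) [x] = [] from by simp [hx]]
    simp

-- concatenation of the buckets named by rs, in order
def pvBuckets (pages : List (List (String × String))) (rs : List Int) : List (List (String × String)) :=
  rs.foldr (fun r acc => pvBucket pages r ++ acc) []

lemma pvBuckets_cons (pages : List (List (String × String))) (r : Int) (rs : List Int) :
    pvBuckets pages (r :: rs) = pvBucket pages r ++ pvBuckets pages rs := rfl

lemma pvMem_buckets {pages : List (List (String × String))} {rs : List Int}
    {y : List (String × String)} (h : y ∈ pvBuckets pages rs) : ∃ r ∈ rs, (pvRank y : Int) = r := by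
  induction rs with
  | nil => simp [pvBuckets] at h
  | cons r rs ih =>
      rw [pvBuckets_cons, List.mem_append] at h
      rcases h with h | h
      · exact ⟨r, by simp, pvBucket_rank h⟩
      · obtain ⟨r', hr', he⟩ := ih h
        exact ⟨r', by simp [hr'], he⟩

lemma pvBuckets_snoc_not_mem (pages : List (List (String × String))) (x : List (String × String))
    (rs : List Int) (h : (pvRank x : Int) ∉ rs) :
    pvBuckets (pages ++ [x]) rs = pvBuckets pages rs := by
  induction rs with
  | nil => rfl
  | cons r rs ih =>
      rw [pvBuckets_cons, pvBuckets_cons, pvBucket_snoc,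
        if_neg (by intro he; exact h (by simp [he])), ih (fun hm => h (by simp [hm]))]

lemma pvIns_buckets (rs : List Int) (pages : List (List (String × String)))
    (x : List (String × String)) (hmem : (pvRank x : Int) ∈ rs) (hinc : rs.Pairwise (· < ·)) :
    PySem.List.insertBy pvBeforeA x (pvBuckets pages rs) = pvBuckets (pages ++ [x]) rs := by
  induction rs with
  | nil => simp at hmem
  | cons r rs ih =>
      rw [pvBuckets_cons, pvBuckets_cons (pages ++ [x]), pvBucket_snoc]
      rw [List.pairwise_cons] at hinc
      by_cases hr : (pvRank x : Int) = r
      · rw [if_pos hr,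
          pvInsertBy_append_right _ _ _ _ (by
            intro y hy
            obtain ⟨r', hr', he⟩ := pvMem_buckets hy
            have hlt : r < r' := hinc.1 r' hr'
            rw [pvBeforeA_iff]
            left; omega),
          pvInsertBy_congr _ (fun a b => decide (pvRelLower a < pvRelLower b)) _ _ (by
            intro y hy
            have he := pvBucket_rank hy
            have heq : pvRank x = pvRank y := by omega
            by_cases hl : pvRelLower x < pvRelLower y
            · rw [(pvBeforeA_iff x y).mpr (Or.inr ⟨heq, hl⟩)]
              simp [hl]
            · rw [pvBeforeA_eq_false x y (by rintro (hh | ⟨-, hh⟩) <;> [omega; exact hl hh])]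
              simp [hl]),
          pvBuckets_snoc_not_mem pages x rs (by
            intro hm
            have hlt : r < (pvRank x : Int) := hinc.1 _ hm
            omega)]
      · have hmem' : (pvRank x : Int) ∈ rs := by
          rcases List.mem_cons.mp hmem with h | h
          · exact absurd h hr
          · exact h
        rw [if_neg hr,
          pvInsertBy_append_left _ _ _ _ (by
            intro y hy
            have he := pvBucket_rank hy
            have hlt : r < (pvRank x : Int) := hinc.1 _ hmem'
            exact pvBeforeA_eq_false x y (by rintro (h | ⟨h, -⟩) <;> omega)),
          ih hmem' hinc.2]

lemma pvSorted_eq_buckets (pages : List (List (String × String))) :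
    prioritize_pages pages = pvBuckets pages [0, 1, 2, 3, 4, 5, 6, 7] := by
  induction pages using List.reverseRecOn with
  | nil => rfl
  | append_singleton ps x ih =>
      rw [pvSortedA_snoc, ih, pvIns_buckets]
      · have hle : pvRank x ≤ 7 := by
          have := pvRankAux_le pvPriorityKeywords (pvRelLower x)
          rwa [pvLen_keywords] at this
        simp only [List.mem_cons, List.not_mem_nil, or_false]
        omega
      · decide

lemma pvAlt_eq (pages : List (List (String × String))) :
    prioritize_pages_alt pages = pvBuckets pages [0, 1, 2, 3, 4, 5, 6, 7] := by
  unfold prioritize_pages_alt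
  rw [show PySem.List.pyRange 0 ((pvPriorityKeywords.length : Int) + 1) 1 = [0, 1, 2, 3, 4, 5, 6, 7] from by decide]
  simp only [pvBuckets, pvBucket, List.foldl_cons, List.foldl_nil, List.foldr_cons,
    List.foldr_nil, List.nil_append, List.append_nil, List.append_assoc]

-- ===== VERDICT (by name: the statement is the Claim_ definition above) =====
theorem prioritize_pages_spec : Claim_equal_prioritize_pages := by
  intro pages _ _
  unfold Spec_prioritize_pages
  rw [pvAlt_eq, pvSorted_eq_buckets]
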